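-- pv_equiv track=rewrite | github.com/aidrecabrera/etl | etl/helpers.py | _recursive_get_all_dependencies_for_step_in_dag
-- ===== SOURCE A (Python) =====
-- from typing import Any, Dict, Iterable, Iterator, List, Optional, Set, Union, cast
--
-- def _recursive_get_all_dependencies_for_step_in_dag(
--     dag: Dict[str, Any], step: str, dependencies: Set[str] = set()
-- ) -> Set[str]:
--     if step in dag:
--         # If step is in the dag, gather all its substeps.
--         substeps = dag[step]
--         # Add substeps to the set of dependencies (union of sets, to avoid repetitions).
--         dependencies = dependencies | set(substeps)
--         for substep in substeps:
--             # For each of the substeps, repeat the process.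
--             dependencies = dependencies | _recursive_get_all_dependencies_for_step_in_dag(
--                 dag, step=substep, dependencies=dependencies
--             )
--     else:
--         # If step is not in the dag, return the default dependencies (which is an empty set).
--         pass
--
--     return dependencies
-- ===== SOURCE B (Python) =====
-- def _recursive_get_all_dependencies_for_step_in_dag(dag, step, dependencies=set()):
--     # Iterative worklist DFS with an explicit stack: each dag key is expanded at
--     # most once, instead of A's recursive re-expansion of already-collected steps.
--     deps = set(dependencies)
--     seen = set()
--     stack = [step]
--     while stack:
--         node = stack.pop()
--         if node in seen or node not in dag:
--             continue
--         seen.add(node)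
--         substeps = dag[node]
--         deps.update(substeps)
--         stack.extend(reversed(substeps))
--     return deps
-- ===== Notes on version B (the rewrite author's own statement) =====
-- stated objective: alternative
-- what changed: A is a recursion that re-expands every substep each time it is reached and re-unions whole recursive results; B is an iterative worklist DFS (explicit stack plus a seen set) that expands each dag key at most once.
-- crash fix: On dags with a dependency cycle reachable from step, A raises RecursionError (unbounded recursion); B returns the set of reachable dependencies. — e.g. on _recursive_get_all_dependencies_for_step_in_dag([("a", ["b"]), ("b", ["a"])], "a", []): A raises RecursionError, B returns ["b", "a"]
import Mathlib
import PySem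

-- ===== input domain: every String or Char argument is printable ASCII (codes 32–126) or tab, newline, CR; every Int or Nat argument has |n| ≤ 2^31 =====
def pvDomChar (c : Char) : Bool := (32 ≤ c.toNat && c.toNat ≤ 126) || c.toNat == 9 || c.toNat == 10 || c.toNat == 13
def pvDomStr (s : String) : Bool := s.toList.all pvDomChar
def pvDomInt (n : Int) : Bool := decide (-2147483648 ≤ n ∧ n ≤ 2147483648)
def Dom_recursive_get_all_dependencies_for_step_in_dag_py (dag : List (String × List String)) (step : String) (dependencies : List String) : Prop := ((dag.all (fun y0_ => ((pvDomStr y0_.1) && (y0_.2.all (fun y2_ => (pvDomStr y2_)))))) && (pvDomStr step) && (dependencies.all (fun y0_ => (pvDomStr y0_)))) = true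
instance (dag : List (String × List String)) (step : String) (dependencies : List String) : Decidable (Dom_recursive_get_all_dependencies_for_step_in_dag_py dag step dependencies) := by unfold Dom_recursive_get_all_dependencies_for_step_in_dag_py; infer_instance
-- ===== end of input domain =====

-- B replaces A's recursive re-expansion of already-collected substeps by an iterative
-- worklist DFS (explicit stack + seen set, each key expanded at most once); Pre_
-- excludes cyclic dags, on which Python A raises RecursionError.

-- ===== PORT A =====
-- A's Python recursion does not terminate on cyclic dags (Pre_ excludes them); the port
-- carries a fuel counter, started at dag.length + 1, which the proofs show is never
-- exhausted under Pre_.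
def pvGoA (dag : List (String × List String)) : Nat → String → PySem.Set String → PySem.Set String
  | 0, _, deps => deps
  | f + 1, step, deps =>
    match (PySem.Dict.mk dag).get? step with
    | none => deps
    | some substeps =>
        -- dependencies = dependencies | set(substeps); then the for-loop over substeps
        substeps.foldl (fun d sub => PySem.Set.union d (pvGoA dag f sub d))
          (PySem.Set.union deps (PySem.Set.ofList substeps))

def recursive_get_all_dependencies_for_step_in_dag_py (dag : List (String × List String)) (step : String) (dependencies : List String) : List String :=
  pvGoA dag (dag.length + 1) step dependencies

-- ===== PORT B =====
-- Source B's while-loop over a Python stack (append/pop at the END) is modelled with the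
-- stack's TOP at the list HEAD: 'stack.pop()' pops the head, 'stack.extend(reversed(substeps))'
-- prepends substeps in order ('substeps ++ rest').  The loop always terminates (each
-- iteration pops one entry; an entry is pushed only when a fresh key is expanded), so the
-- fuel 'pvFuelB' — 1 + total length of the values of the distinct keys — always suffices.
def pvFuelB (dag : List (String × List String)) : Nat :=
  1 + (((PySem.Set.ofList (dag.map Prod.fst)).map
        (fun k => ((PySem.Dict.mk dag).getD k []).length))).sum

def pvLoop (dag : List (String × List String)) : Nat → List String → PySem.Set String → PySem.Set String → PySem.Set String
  | 0, _, _, deps => deps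
  | _ + 1, [], _, deps => deps
  | f + 1, node :: stack, seen, deps =>
    if PySem.Set.contains seen node then pvLoop dag f stack seen deps
    else
      match (PySem.Dict.mk dag).get? node with
      | none => pvLoop dag f stack seen deps
      | some substeps =>
          pvLoop dag f (substeps ++ stack) (PySem.Set.add seen node)
            (PySem.Set.update deps substeps)

def recursive_get_all_dependencies_for_step_in_dag_py_alt (dag : List (String × List String)) (step : String) (dependencies : List String) : List String :=
  pvLoop dag (pvFuelB dag) [step] PySem.Set.empty dependencies

-- ===== PRECONDITION & SPEC =====
-- pvPathOk dag f s = true iff no dependency chain of f edges leaves s (all key-paths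
-- from s are shorter than f).
def pvPathOk (dag : List (String × List String)) : Nat → String → Bool
  | 0, s => ((PySem.Dict.mk dag).get? s).isNone
  | f + 1, s =>
    match (PySem.Dict.mk dag).get? s with
    | none => true
    | some subs => subs.all (fun c => pvPathOk dag f c)

-- Pre_ excludes exactly the dags with a dependency cycle reachable from step (a key-path
-- of dag.length + 1 edges must repeat a key): there Python A recurses forever and raises
-- RecursionError, returning no value.
def Pre_recursive_get_all_dependencies_for_step_in_dag_py (dag : List (String × List String)) (step : String) (dependencies : List String) : Prop :=
  pvPathOk dag (dag.length + 1) step = true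
instance (dag : List (String × List String)) (step : String) (dependencies : List String) : Decidable (Pre_recursive_get_all_dependencies_for_step_in_dag_py dag step dependencies) := by unfold Pre_recursive_get_all_dependencies_for_step_in_dag_py; infer_instance

def pvWitness_recursive_get_all_dependencies_for_step_in_dag_py : (List (String × List String)) × String × List String :=
  ([("a", ["b", "c"]), ("b", ["c"])], "a", ["z"])

-- On dags with a dependency cycle reachable from step, A raises RecursionError
-- (unbounded recursion); B returns the set of reachable dependencies.
def Raises_recursive_get_all_dependencies_for_step_in_dag_py (dag : List (String × List String)) (step : String) (dependencies : List String) : Prop :=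
  pvPathOk dag (dag.length + 1) step = false
instance (dag : List (String × List String)) (step : String) (dependencies : List String) : Decidable (Raises_recursive_get_all_dependencies_for_step_in_dag_py dag step dependencies) := by unfold Raises_recursive_get_all_dependencies_for_step_in_dag_py; infer_instance
def pvRaiseWitness_recursive_get_all_dependencies_for_step_in_dag_py : (List (String × List String)) × String × List String :=
  ([("a", ["b"]), ("b", ["a"])], "a", [])
def pvRaiseWitnessOut_recursive_get_all_dependencies_for_step_in_dag_py : List String := ["b", "a"]

def Spec_recursive_get_all_dependencies_for_step_in_dag_py (dag : List (String × List String)) (step : String) (dependencies : List String) (out : List String) : Prop := out = recursive_get_all_dependencies_for_step_in_dag_py_alt dag step dependencies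
instance (dag : List (String × List String)) (step : String) (dependencies : List String) (out : List String) : Decidable (Spec_recursive_get_all_dependencies_for_step_in_dag_py dag step dependencies out) := by unfold Spec_recursive_get_all_dependencies_for_step_in_dag_py; infer_instance

-- ===== CLAIM (what is proved, stated in full; the proofs are below) =====
def Claim_equal_recursive_get_all_dependencies_for_step_in_dag_py : Prop := ∀ (dag : List (String × List String)) (step : String) (dependencies : List String), Dom_recursive_get_all_dependencies_for_step_in_dag_py dag step dependencies → Pre_recursive_get_all_dependencies_for_step_in_dag_py dag step dependencies → Spec_recursive_get_all_dependencies_for_step_in_dag_py dag step dependencies (recursive_get_all_dependencies_for_step_in_dag_py dag step dependencies)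

def Claim_raises_recursive_get_all_dependencies_for_step_in_dag_py : Prop := (∀ (dag : List (String × List String)) (step : String) (dependencies : List String), Dom_recursive_get_all_dependencies_for_step_in_dag_py dag step dependencies → Raises_recursive_get_all_dependencies_for_step_in_dag_py dag step dependencies → ¬ Pre_recursive_get_all_dependencies_for_step_in_dag_py dag step dependencies) ∧ (Dom_recursive_get_all_dependencies_for_step_in_dag_py (pvRaiseWitness_recursive_get_all_dependencies_for_step_in_dag_py.1) (pvRaiseWitness_recursive_get_all_dependencies_for_step_in_dag_py.2.1) (pvRaiseWitness_recursive_get_all_dependencies_for_step_in_dag_py.2.2) ∧ Raises_recursive_get_all_dependencies_for_step_in_dag_py (pvRaiseWitness_recursive_get_all_dependencies_for_step_in_dag_py.1) (pvRaiseWitness_recursive_get_all_dependencies_for_step_in_dag_py.2.1) (pvRaiseWitness_recursive_get_all_dependencies_for_step_in_dag_py.2.2) ∧ recursive_get_all_dependencies_for_step_in_dag_py_alt (pvRaiseWitness_recursive_get_all_dependencies_for_step_in_dag_py.1) (pvRaiseWitness_recursive_get_all_dependencies_for_step_in_dag_py.2.1) (pvRaiseWitness_recursive_get_all_dependencies_for_step_in_dag_py.2.2)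 = pvRaiseWitnessOut_recursive_get_all_dependencies_for_step_in_dag_py)

-- ===== LEMMAS AND PROOFS =====

-- Proof-only intermediate: the recursive visited-DFS ('visit' as a recursive function),
-- the stepping stone between A's recursion and B's worklist loop.
def pvVisit (dag : List (String × List String)) : Nat → String → PySem.Set String → PySem.Set String → PySem.Set String × PySem.Set String
  | 0, _, vis, deps => (vis, deps)
  | f + 1, node, vis, deps =>
    if PySem.Set.contains vis node then (vis, deps)
    else
      match (PySem.Dict.mk dag).get? node with
      | none => (vis, deps)
      | some substeps =>
          substeps.foldl (fun p sub => pvVisit dag f sub p.1 p.2)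
            (PySem.Set.add vis node, PySem.Set.update deps substeps)

-- edges of the dag: pvEdge dag a b iff b is listed among the substeps of key a
def pvEdge (dag : List (String × List String)) (a b : String) : Prop :=
  ∃ subs, (PySem.Dict.mk dag).get? a = some subs ∧ b ∈ subs

-- b is a (transitive, ≥ 1 step) dependency of a
def pvDesc (dag : List (String × List String)) : String → String → Prop :=
  Relation.TransGen (pvEdge dag)

lemma pvUpdate_absorb {s : PySem.Set String} {t : List String}
    (h : ∀ x ∈ t, x ∈ s) : PySem.Set.update s t = s := by
  rw [PySem.Set.update_eq_append_filter]
  have hnil : List.filter (fun y => !s.contains y) (PySem.Set.ofList t) = [] := by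
    rw [List.filter_eq_nil_iff]
    intro a ha
    simpa using h a ((PySem.Set.mem_ofList t a).mp ha)
  rw [hnil, List.append_nil]

lemma pvUpdate_shape (s : PySem.Set String) (t : List String) :
    ∃ u, PySem.Set.update s t = s ++ u ∧ u.Nodup ∧ ∀ x ∈ u, x ∉ s := by
  refine ⟨List.filter (fun y => !s.contains y) (PySem.Set.ofList t),
    PySem.Set.update_eq_append_filter s t, (PySem.Set.nodup_ofList t).filter _, ?_⟩
  intro x hx hmem
  have h2 : x ∉ s := by simpa using List.of_mem_filter hx
  exact h2 hmem

lemma pvUpdate_append_absorb {s : PySem.Set String} {t : List String}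
    (h1 : t.Nodup) (h2 : ∀ x ∈ t, x ∉ s) :
    PySem.Set.update s (s ++ t) = s ++ t := by
  rw [PySem.Set.update_append, pvUpdate_absorb (fun x hx => hx)]
  exact PySem.Set.update_eq_append_of_disjoint s t h1 h2

lemma pvFoldl_shape {l : List String} {g : PySem.Set String → String → PySem.Set String}
    (hg : ∀ acc x, x ∈ l → ∃ t, g acc x = acc ++ t ∧ t.Nodup ∧ ∀ y ∈ t, y ∉ acc) :
    ∀ acc, ∃ t, l.foldl g acc = acc ++ t ∧ t.Nodup ∧ ∀ y ∈ t, y ∉ acc := by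
  induction l with
  | nil => exact fun acc => ⟨[], by simp, by simp, by simp⟩
  | cons x xs ih =>
    intro acc
    obtain ⟨t1, he1, hn1, hd1⟩ := hg acc x (by simp)
    obtain ⟨t2, he2, hn2, hd2⟩ := ih (fun a y hy => hg a y (by simp [hy])) (acc ++ t1)
    refine ⟨t1 ++ t2, ?_, ?_, ?_⟩
    · simp [List.foldl_cons, he1, he2, List.append_assoc]
    · refine List.Nodup.append hn1 hn2 ?_
      intro a ha1 ha2
      exact hd2 a ha2 (by simp [ha1])
    · intro y hy hacc
      rcases List.mem_append.mp hy with h | h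
      · exact hd1 y h hacc
      · exact hd2 y h (by simp [hacc])

lemma pvGoA_shape (dag : List (String × List String)) :
    ∀ (f : Nat) (s : String) (d : PySem.Set String),
      ∃ t, pvGoA dag f s d = d ++ t ∧ t.Nodup ∧ ∀ x ∈ t, x ∉ d := by
  intro f
  induction f with
  | zero => exact fun s d => ⟨[], by simp [pvGoA], by simp, by simp⟩
  | succ f ih =>
    intro s d
    unfold pvGoA
    cases hk : (PySem.Dict.mk dag).get? s with
    | none => exact ⟨[], by simp, by simp, by simp⟩
    | some subs =>
      simp only []
      obtain ⟨t0, he0, hn0, hd0⟩ := pvUpdate_shape d (PySem.Set.ofList subs)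
      have hstep : ∀ (acc : PySem.Set String) (x : String), x ∈ subs →
          ∃ t, PySem.Set.union acc (pvGoA dag f x acc) = acc ++ t ∧ t.Nodup ∧ ∀ y ∈ t, y ∉ acc := by
        intro acc x _
        obtain ⟨t, he, hn, hd⟩ := ih x acc
        refine ⟨t, ?_, hn, hd⟩
        show PySem.Set.update acc (pvGoA dag f x acc) = acc ++ t
        rw [he, pvUpdate_append_absorb hn hd]
      obtain ⟨t1, he1, hn1, hd1⟩ := pvFoldl_shape hstep (PySem.Set.union d (PySem.Set.ofList subs))
      refine ⟨t0 ++ t1, ?_, ?_, ?_⟩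
      · rw [he1]
        show PySem.Set.update d (PySem.Set.ofList subs) ++ t1 = d ++ (t0 ++ t1)
        rw [he0, List.append_assoc]
      · refine List.Nodup.append hn0 hn1 ?_
        intro a ha0 ha1
        have : (a : String) ∉ PySem.Set.union d (PySem.Set.ofList subs) := hd1 a ha1
        exact this (by rw [show PySem.Set.union d (PySem.Set.ofList subs) = d ++ t0 from he0]; simp [ha0])
      · intro x hx hmem
        rcases List.mem_append.mp hx with h | h
        · exact hd0 x h hmem
        · exact hd1 x h (by rw [show PySem.Set.union d (PySem.Set.ofList subs) = d ++ t0 from he0]; simp [hmem])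

lemma pvGoA_mono {dag : List (String × List String)} (f : Nat) (s : String)
    (d : PySem.Set String) {x : String} (hx : x ∈ d) : x ∈ pvGoA dag f s d := by
  obtain ⟨t, he, -, -⟩ := pvGoA_shape dag f s d
  rw [he]; exact List.mem_append_left t hx

lemma pvGoA_collapse (dag : List (String × List String)) (f : Nat) (s : String)
    (d : PySem.Set String) : PySem.Set.union d (pvGoA dag f s d) = pvGoA dag f s d := by
  obtain ⟨t, he, hn, hd⟩ := pvGoA_shape dag f s d
  show PySem.Set.update d (pvGoA dag f s d) = pvGoA dag f s d
  rw [he, pvUpdate_append_absorb hn hd]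

lemma pvPathOk_children {dag : List (String × List String)} {f : Nat} {s : String}
    {subs : List String} (h : pvPathOk dag (f + 1) s = true)
    (hk : (PySem.Dict.mk dag).get? s = some subs) :
    ∀ c ∈ subs, pvPathOk dag f c = true := by
  unfold pvPathOk at h
  rw [hk] at h
  simpa using h

lemma pvPathOk_desc {dag : List (String × List String)} {w : String} :
    ∀ (f : Nat) (s : String), pvPathOk dag f s = true → pvDesc dag s w →
      ∃ f', f' < f ∧ pvPathOk dag f' w = true := by
  intro f
  induction f with
  | zero =>
    intro s h hd
    obtain ⟨m, ⟨subs, hk, -⟩, -⟩ := Relation.TransGen.head'_iff.mp hd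
    simp [pvPathOk, hk] at h
  | succ f ih =>
    intro s h hd
    obtain ⟨m, he, hr⟩ := Relation.TransGen.head'_iff.mp hd
    obtain ⟨subs, hk, hm⟩ := he
    have hm' : pvPathOk dag f m = true := pvPathOk_children h hk m hm
    rcases Relation.ReflTransGen.cases_head hr with rfl | ⟨c, hc, hrc⟩
    · exact ⟨f, Nat.lt_succ_self f, hm'⟩
    · obtain ⟨f', hlt, hok⟩ := ih m hm' (Relation.TransGen.head' hc hrc)
      exact ⟨f', Nat.lt_succ_of_lt hlt, hok⟩

lemma pvPathOk_noloop {dag : List (String × List String)} {f : Nat} {s : String}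
    (h : pvPathOk dag f s = true) : ¬ pvDesc dag s s := by
  induction f using Nat.strong_induction_on generalizing s with
  | _ f ih =>
    intro hd
    obtain ⟨f', hlt, h'⟩ := pvPathOk_desc f s h hd
    exact ih f' hlt h' hd

lemma pvGoA_idem (dag : List (String × List String)) :
    ∀ (f : Nat) (s : String) (d : PySem.Set String),
      (∀ c, pvDesc dag s c → c ∈ d) → pvGoA dag f s d = d := by
  intro f
  induction f with
  | zero => intro s d _; rfl
  | succ f ih =>
    intro s d h
    unfold pvGoA
    cases hk : (PySem.Dict.mk dag).get? s with
    | none => rfl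
    | some subs =>
      simp only []
      have hsub : ∀ x ∈ subs, x ∈ d := fun x hx =>
        h x (Relation.TransGen.single ⟨subs, hk, hx⟩)
      have h1 : PySem.Set.union d (PySem.Set.ofList subs) = d := by
        show PySem.Set.update d (PySem.Set.ofList subs) = d
        exact pvUpdate_absorb (fun x hx => hsub x ((PySem.Set.mem_ofList subs x).mp hx))
      rw [h1]
      have hconst : ∀ x ∈ subs, PySem.Set.union d (pvGoA dag f x d) = d := by
        intro x hx
        have : pvGoA dag f x d = d := ih x d (fun c hc =>
          h c (Relation.TransGen.head ⟨subs, hk, hx⟩ hc))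
        rw [this]
        show PySem.Set.update d d = d
        exact pvUpdate_absorb (fun y hy => hy)
      clear h1 hsub h hk
      induction subs with
      | nil => rfl
      | cons x xs ihs =>
        rw [List.foldl_cons, hconst x (by simp)]
        exact ihs (fun y hy => hconst y (by simp [hy]))

lemma pvMain (dag : List (String × List String)) :
    ∀ (f : Nat) (s : String) (vis d : PySem.Set String),
      pvPathOk dag f s = true →
      (∀ v ∈ vis, (∀ c, pvDesc dag v c → c ∈ d) ∨ ¬ Relation.ReflTransGen (pvEdge dag) s v) →
      (pvVisit dag f s vis d).2 = pvGoA dag f s d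
      ∧ (∀ c, pvDesc dag s c → c ∈ (pvVisit dag f s vis d).2)
      ∧ (∀ v ∈ (pvVisit dag f s vis d).1,
          (∀ c, pvDesc dag v c → c ∈ (pvVisit dag f s vis d).2) ∨ v ∈ vis) := by
  intro f
  induction f with
  | zero =>
    intro s vis d h hv
    have hnone : (PySem.Dict.mk dag).get? s = none := by
      simpa [pvPathOk, Option.isNone_iff_eq_none] using h
    refine ⟨rfl, ?_, fun v hv' => Or.inr hv'⟩
    intro c hc
    obtain ⟨m, ⟨subs, hk, -⟩, -⟩ := Relation.TransGen.head'_iff.mp hc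
    rw [hnone] at hk; cases hk
  | succ f ih =>
    intro s vis d h hv
    by_cases hcv : PySem.Set.contains vis s
    · -- s already visited: B skips; A's re-expansion is a no-op
      have hB : pvVisit dag (f + 1) s vis d = (vis, d) := by
        rw [pvVisit.eq_2, if_pos hcv]
      have hsmem : s ∈ vis := (PySem.Set.contains_iff vis s).mp hcv
      have hds : ∀ c, pvDesc dag s c → c ∈ d := by
        rcases hv s hsmem with h1 | h2
        · exact h1
        · exact absurd Relation.ReflTransGen.refl h2
      have hA : pvGoA dag (f + 1) s d = d := pvGoA_idem dag (f + 1) s d hds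
      rw [hB, hA]
      exact ⟨rfl, hds, fun v hv' => Or.inr hv'⟩
    · cases hk : (PySem.Dict.mk dag).get? s with
      | none =>
        have hB : pvVisit dag (f + 1) s vis d = (vis, d) := by
          rw [pvVisit.eq_2, if_neg hcv, hk]
        have hA : pvGoA dag (f + 1) s d = d := by
          rw [pvGoA.eq_2, hk]
        rw [hB, hA]
        refine ⟨rfl, ?_, fun v hv' => Or.inr hv'⟩
        intro c hc
        obtain ⟨m, ⟨subs, hk', -⟩, -⟩ := Relation.TransGen.head'_iff.mp hc
        rw [hk] at hk'; cases hk'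
      | some subs =>
        have hnoloop : ¬ pvDesc dag s s := pvPathOk_noloop h
        have hchild : ∀ c ∈ subs, pvPathOk dag f c = true := pvPathOk_children h hk
        have hupd : PySem.Set.union d (PySem.Set.ofList subs) = PySem.Set.update d subs := by
          show PySem.Set.update d (PySem.Set.ofList subs) = PySem.Set.update d subs
          rw [PySem.Set.update_eq_append_filter, PySem.Set.update_eq_append_filter,
            PySem.Set.ofList_ofList]
        have hB : pvVisit dag (f + 1) s vis d =
            List.foldl (fun p sub => pvVisit dag f sub p.1 p.2)
              (PySem.Set.add vis s, PySem.Set.update d subs) subs := by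
          rw [pvVisit.eq_2, if_neg hcv, hk]
        have hA : pvGoA dag (f + 1) s d =
            List.foldl (fun a c => pvGoA dag f c a) (PySem.Set.update d subs) subs := by
          have h1 : pvGoA dag (f + 1) s d =
              List.foldl (fun a c => PySem.Set.union a (pvGoA dag f c a))
                (PySem.Set.union d (PySem.Set.ofList subs)) subs := by
            rw [pvGoA.eq_2, hk]
          rw [h1, hupd]
          exact List.foldl_ext _ _ _ (fun a c _ => pvGoA_collapse dag f c a)
        have inner : ∀ (l : List String), (∀ c ∈ l, c ∈ subs) →
            ∀ (vis' acc : PySem.Set String),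
              (∀ v ∈ vis', (∀ c, pvDesc dag v c → c ∈ acc) ∨ ¬ pvDesc dag s v) →
              (List.foldl (fun p sub => pvVisit dag f sub p.1 p.2) (vis', acc) l).2 =
                  List.foldl (fun a c => pvGoA dag f c a) acc l
              ∧ (∀ x ∈ acc, x ∈ (List.foldl (fun p sub => pvVisit dag f sub p.1 p.2) (vis', acc) l).2)
              ∧ (∀ m ∈ l, ∀ c, pvDesc dag m c →
                  c ∈ (List.foldl (fun p sub => pvVisit dag f sub p.1 p.2) (vis', acc) l).2)
              ∧ (∀ v ∈ (List.foldl (fun p sub => pvVisit dag f sub p.1 p.2) (vis', acc) l).1,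
                  (∀ c, pvDesc dag v c →
                    c ∈ (List.foldl (fun p sub => pvVisit dag f sub p.1 p.2) (vis', acc) l).2)
                  ∨ v ∈ vis') := by
          intro l
          induction l with
          | nil =>
            intro _ vis' acc hJ
            exact ⟨rfl, fun x hx => hx, by simp, fun v hv' => Or.inr hv'⟩
          | cons c cs ihl =>
            intro hmem vis' acc hJ
            have hcsub : c ∈ subs := hmem c (by simp)
            have hedge : pvEdge dag s c := ⟨subs, hk, hcsub⟩
            have hcall : ∀ v ∈ vis', (∀ c', pvDesc dag v c' → c' ∈ acc) ∨
                ¬ Relation.ReflTransGen (pvEdge dag) c v := by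
              intro v hv'
              rcases hJ v hv' with h1 | h2
              · exact Or.inl h1
              · exact Or.inr (fun hr => h2 (Relation.TransGen.head' hedge hr))
            obtain ⟨e1, e2, e3⟩ := ih c vis' acc (hchild c hcsub) hcall
            have hmono1 : ∀ x ∈ acc, x ∈ (pvVisit dag f c vis' acc).2 := by
              rw [e1]; exact fun x hx => pvGoA_mono f c acc hx
            have hJ' : ∀ v ∈ (pvVisit dag f c vis' acc).1,
                (∀ c', pvDesc dag v c' → c' ∈ (pvVisit dag f c vis' acc).2) ∨ ¬ pvDesc dag s v := by
              intro v hv'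
              rcases e3 v hv' with h1 | h1
              · exact Or.inl h1
              · rcases hJ v h1 with h2 | h2
                · exact Or.inl (fun c' hc' => hmono1 c' (h2 c' hc'))
                · exact Or.inr h2
            obtain ⟨E1, E2, E3, E4⟩ := ihl (fun c' hc' => hmem c' (by simp [hc']))
              (pvVisit dag f c vis' acc).1 (pvVisit dag f c vis' acc).2 hJ'
            have hfold : List.foldl (fun p sub => pvVisit dag f sub p.1 p.2) (vis', acc) (c :: cs) =
                List.foldl (fun p sub => pvVisit dag f sub p.1 p.2)
                  ((pvVisit dag f c vis' acc).1, (pvVisit dag f c vis' acc).2) cs := by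
              rw [List.foldl_cons]
            rw [hfold]
            refine ⟨?_, ?_, ?_, ?_⟩
            · rw [E1, List.foldl_cons, e1]
            · exact fun x hx => E2 x (hmono1 x hx)
            · intro m hm c' hc'
              rcases List.mem_cons.mp hm with rfl | hm'
              · exact E2 c' (e2 c' hc')
              · exact E3 m hm' c' hc'
            · intro v hv'
              rcases E4 v hv' with h1 | h1
              · exact Or.inl h1
              · rcases e3 v h1 with h2 | h2
                · exact Or.inl (fun c' hc' => E2 c' (h2 c' hc'))
                · exact Or.inr h2
        have hJ0 : ∀ v ∈ PySem.Set.add vis s,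
            (∀ c, pvDesc dag v c → c ∈ PySem.Set.update d subs) ∨ ¬ pvDesc dag s v := by
          intro v hv'
          rcases (PySem.Set.mem_add vis s v).mp hv' with h1 | rfl
          · rcases hv v h1 with h2 | h2
            · exact Or.inl (fun c hc =>
                (PySem.Set.mem_update d subs c).mpr (Or.inl (h2 c hc)))
            · exact Or.inr (fun hd' => h2 hd'.to_reflTransGen)
          · exact Or.inr hnoloop
        obtain ⟨E1, E2, E3, E4⟩ := inner subs (fun c hc => hc)
          (PySem.Set.add vis s) (PySem.Set.update d subs) hJ0
        have hDescS : ∀ c, pvDesc dag s c →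
            c ∈ (List.foldl (fun p sub => pvVisit dag f sub p.1 p.2)
              (PySem.Set.add vis s, PySem.Set.update d subs) subs).2 := by
          intro c hc
          obtain ⟨m, ⟨subs', hk', hm⟩, hr⟩ := Relation.TransGen.head'_iff.mp hc
          rw [hk] at hk'
          injection hk' with hk''
          subst hk''
          rcases Relation.ReflTransGen.cases_head hr with rfl | ⟨c2, hc2, hr2⟩
          · exact E2 m ((PySem.Set.mem_update d subs m).mpr (Or.inr hm))
          · exact E3 m hm c (Relation.TransGen.head' hc2 hr2)
        rw [hB, hA]
        refine ⟨E1, hDescS, ?_⟩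
        intro v hv'
        rcases E4 v hv' with h1 | h1
        · exact Or.inl h1
        · rcases (PySem.Set.mem_add vis s v).mp h1 with h2 | rfl
          · exact Or.inr h2
          · exact Or.inl hDescS

-- ---- bridge: the worklist loop pvLoop equals the recursive DFS pvVisit ----

-- first-occurrence key list of the dag and the remaining-work potential
def pvKeys (dag : List (String × List String)) : PySem.Set String :=
  PySem.Set.ofList (dag.map Prod.fst)

def pvWSum (dag : List (String × List String)) (w : String → Nat) (vis : PySem.Set String) : Nat :=
  (((pvKeys dag).filter (fun k => !PySem.Set.contains vis k)).map w).sum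

lemma pvGet?_mem_keys {dag : List (String × List String)} {n : String} {subs : List String}
    (h : (PySem.Dict.mk dag).get? n = some subs) : n ∈ pvKeys dag := by
  rw [pvKeys, PySem.Set.mem_ofList]
  induction dag with
  | nil => simp [PySem.Dict.get?] at h
  | cons p rest ih =>
    rw [show PySem.Dict.mk (p :: rest) = PySem.Dict.mk ((p.1, p.2) :: rest) by simp] at h
    rw [PySem.Dict.get?_mk_cons] at h
    by_cases he : p.1 = n
    · simp [he]
    · rw [if_neg (by simpa using he)] at h
      simpa using Or.inr (ih h)

lemma pvSum_filter_erase {w : String → Nat} :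
    ∀ (L : List String), L.Nodup → ∀ {n}, n ∈ L →
      ((L.filter (fun k => !(k == n))).map w).sum + w n = (L.map w).sum := by
  intro L
  induction L with
  | nil => intro _ n h; cases h
  | cons x xs ih =>
    intro hnd n hn
    rcases List.mem_cons.mp hn with rfl | hx
    · have hxout : xs.filter (fun k => !(k == n)) = xs := by
        rw [List.filter_eq_self]
        intro a ha
        have : a ≠ n := fun he => (List.nodup_cons.mp hnd).1 (he ▸ ha)
        simpa using this
      simp [hxout, Nat.add_comm]
    · have hxne : ¬(x = n) := fun he => (List.nodup_cons.mp hnd).1 (he ▸ hx)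
      have := ih (List.nodup_cons.mp hnd).2 hx
      simp only [List.filter_cons]
      rw [if_pos (by simpa using hxne)]
      simp only [List.map_cons, List.sum_cons]
      omega

lemma pvWSum_add {dag : List (String × List String)} {w : String → Nat} {vis : PySem.Set String}
    {n : String} (hk : n ∈ pvKeys dag) (hnv : n ∉ vis) :
    pvWSum dag w (PySem.Set.add vis n) + w n = pvWSum dag w vis := by
  unfold pvWSum
  have hadd : PySem.Set.add vis n = vis ++ [n] := PySem.Set.add_of_not_mem hnv
  have hfeq : (pvKeys dag).filter (fun k => !PySem.Set.contains (PySem.Set.add vis n) k) =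
      ((pvKeys dag).filter (fun k => !PySem.Set.contains vis k)).filter (fun k => !(k == n)) := by
    rw [hadd, List.filter_filter]
    apply List.filter_congr
    intro a _
    show (!PySem.Set.contains (vis ++ [n]) a) = (!(a == n) && !PySem.Set.contains vis a)
    simp [PySem.Set.contains, Bool.or_comm]
    cases h1 : a == n <;> cases h2 : vis.contains a <;> simp_all
  rw [hfeq]
  apply pvSum_filter_erase
  · exact ((PySem.Set.nodup_ofList _).filter _ : ((pvKeys dag).filter _).Nodup)
  · rw [List.mem_filter]
    exact ⟨hk, by simpa [PySem.Set.contains_iff] using hnv⟩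

lemma pvWSum_anti {dag : List (String × List String)} {w : String → Nat}
    {vis vis' : PySem.Set String} (h : ∀ k, k ∈ vis → k ∈ vis') :
    pvWSum dag w vis' ≤ pvWSum dag w vis := by
  unfold pvWSum
  apply List.Sublist.sum_le_sum _ (by intro x _; exact Nat.zero_le x)
  apply List.Sublist.map
  apply List.monotone_filter_right
  intro a ha
  simp only [Bool.not_eq_true', ← Bool.not_eq_true, PySem.Set.contains_iff] at *
  exact fun hm => ha (h a hm)

-- number of unexpanded keys
def pvKappa (dag : List (String × List String)) (vis : PySem.Set String) : Nat :=
  pvWSum dag (fun _ => 1) vis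

lemma pvKappa_le (dag : List (String × List String)) (vis : PySem.Set String) :
    pvKappa dag vis ≤ dag.length := by
  unfold pvKappa pvWSum
  have h1 : (((pvKeys dag).filter (fun k => !PySem.Set.contains vis k)).map (fun _ => (1:Nat))).sum
      = ((pvKeys dag).filter (fun k => !PySem.Set.contains vis k)).length := by
    induction ((pvKeys dag).filter (fun k => !PySem.Set.contains vis k)) with
    | nil => rfl
    | cons x xs _ => simp [Nat.add_comm]
  rw [h1]
  calc ((pvKeys dag).filter _).length ≤ (pvKeys dag).length := List.length_filter_le _ _
    _ ≤ (dag.map Prod.fst).length := PySem.Set.length_ofList_le _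
    _ = dag.length := by simp

lemma pvVisit_vis_mono (dag : List (String × List String)) :
    ∀ (f : Nat) (n : String) (vis d : PySem.Set String) (k : String),
      k ∈ vis → k ∈ (pvVisit dag f n vis d).1 := by
  intro f
  induction f with
  | zero => intro n vis d k hk; exact hk
  | succ f ih =>
    intro n vis d k hk
    rw [pvVisit.eq_2]
    by_cases hcv : PySem.Set.contains vis n
    · rw [if_pos hcv]; exact hk
    · rw [if_neg hcv]
      cases hg : (PySem.Dict.mk dag).get? n with
      | none => exact hk
      | some subs =>
        simp only []
        have hfold : ∀ (l : List String) (p : PySem.Set String × PySem.Set String),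
            k ∈ p.1 → k ∈ (l.foldl (fun p sub => pvVisit dag f sub p.1 p.2) p).1 := by
          intro l
          induction l with
          | nil => intro p hp; exact hp
          | cons c cs ihl =>
            intro p hp
            rw [List.foldl_cons]
            exact ihl _ (ih c p.1 p.2 k hp)
        exact hfold subs _ ((PySem.Set.mem_add vis n k).mpr (Or.inl hk))

lemma pvKappa_add {dag : List (String × List String)} {vis : PySem.Set String} {n : String}
    (hk : n ∈ pvKeys dag) (hnv : n ∉ vis) :
    pvKappa dag (PySem.Set.add vis n) + 1 = pvKappa dag vis :=
  pvWSum_add hk hnv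

lemma pvKappa_anti {dag : List (String × List String)} {vis vis' : PySem.Set String}
    (h : ∀ k, k ∈ vis → k ∈ vis') : pvKappa dag vis' ≤ pvKappa dag vis :=
  pvWSum_anti h

-- pvVisit does not depend on the fuel once the fuel exceeds the number of unexpanded keys
lemma pvVisit_fuel (dag : List (String × List String)) :
    ∀ (f1 f2 : Nat) (n : String) (vis d : PySem.Set String),
      pvKappa dag vis < f1 → pvKappa dag vis < f2 →
      pvVisit dag f1 n vis d = pvVisit dag f2 n vis d := by
  intro f1
  induction f1 using Nat.strong_induction_on with
  | _ f1 ih =>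
    intro f2 n vis d h1 h2
    cases f1 with
    | zero => exact absurd h1 (Nat.not_lt_zero _)
    | succ a =>
      cases f2 with
      | zero => exact absurd h2 (Nat.not_lt_zero _)
      | succ b =>
        rw [pvVisit.eq_2, pvVisit.eq_2]
        by_cases hcv : PySem.Set.contains vis n
        · rw [if_pos hcv, if_pos hcv]
        · rw [if_neg hcv, if_neg hcv]
          cases hg : (PySem.Dict.mk dag).get? n with
          | none => rfl
          | some subs =>
            simp only []
            have hnv : n ∉ vis := by
              intro hm; exact hcv ((PySem.Set.contains_iff vis n).mpr hm)
            have hka : pvKappa dag (PySem.Set.add vis n) + 1 = pvKappa dag vis :=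
              pvKappa_add (pvGet?_mem_keys hg) hnv
            have hfold : ∀ (l : List String) (p : PySem.Set String × PySem.Set String),
                pvKappa dag p.1 < a → pvKappa dag p.1 < b →
                l.foldl (fun p sub => pvVisit dag a sub p.1 p.2) p
                  = l.foldl (fun p sub => pvVisit dag b sub p.1 p.2) p := by
              intro l
              induction l with
              | nil => intro p _ _; rfl
              | cons c cs ihl =>
                intro p hpa hpb
                rw [List.foldl_cons, List.foldl_cons,
                  ih a (Nat.lt_succ_self a) b c p.1 p.2 hpa hpb]
                apply ihl
                · exact lt_of_le_of_lt
                    (pvKappa_anti (fun k hk => pvVisit_vis_mono dag b c p.1 p.2 k hk)) hpa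
                · exact lt_of_le_of_lt
                    (pvKappa_anti (fun k hk => pvVisit_vis_mono dag b c p.1 p.2 k hk)) hpb
            have hla : pvKappa dag (PySem.Set.add vis n) < a := by omega
            have hlb : pvKappa dag (PySem.Set.add vis n) < b := by omega
            exact hfold subs _ hla hlb

lemma pvFoldVisit_fuel (dag : List (String × List String)) (a b : Nat) :
    ∀ (l : List String) (p : PySem.Set String × PySem.Set String),
      pvKappa dag p.1 < a → pvKappa dag p.1 < b →
      l.foldl (fun p sub => pvVisit dag a sub p.1 p.2) p
        = l.foldl (fun p sub => pvVisit dag b sub p.1 p.2) p := by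
  intro l
  induction l with
  | nil => intro p _ _; rfl
  | cons c cs ihl =>
    intro p hpa hpb
    rw [List.foldl_cons, List.foldl_cons, pvVisit_fuel dag a b c p.1 p.2 hpa hpb]
    apply ihl
    · exact lt_of_le_of_lt
        (pvKappa_anti (fun k hk => pvVisit_vis_mono dag b c p.1 p.2 k hk)) hpa
    · exact lt_of_le_of_lt
        (pvKappa_anti (fun k hk => pvVisit_vis_mono dag b c p.1 p.2 k hk)) hpb

-- the remaining-work potential: pending stack entries plus the value lengths of the
-- still-unexpanded keys; it bounds the number of loop iterations exactly
def pvPhi (dag : List (String × List String)) (vis : PySem.Set String) : Nat :=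
  pvWSum dag (fun k => ((PySem.Dict.mk dag).getD k []).length) vis

-- the worklist loop computes the fold of the recursive DFS over the stack
lemma pvBridge (dag : List (String × List String)) :
    ∀ (f : Nat) (st : List String) (vis deps : PySem.Set String),
      st.length + pvPhi dag vis ≤ f →
      pvLoop dag f st vis deps =
        (st.foldl (fun p n => pvVisit dag (dag.length + 1) n p.1 p.2) (vis, deps)).2 := by
  intro f
  induction f with
  | zero =>
    intro st vis deps h
    cases st with
    | nil => rfl
    | cons a b => simp at h
  | succ f ih =>
    intro st vis deps h
    cases st with
    | nil => rfl
    | cons n st' =>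
      rw [pvLoop.eq_3, List.foldl_cons]
      by_cases hcv : PySem.Set.contains vis n
      · rw [if_pos hcv]
        have hV : pvVisit dag (dag.length + 1) n vis deps = (vis, deps) := by
          rw [pvVisit.eq_2, if_pos hcv]
        rw [hV, ih st' vis deps (by simp at h; omega)]
      · rw [if_neg hcv]
        have hnv : n ∉ vis := by
          intro hm; exact hcv ((PySem.Set.contains_iff vis n).mpr hm)
        cases hg : (PySem.Dict.mk dag).get? n with
        | none =>
          have hV : pvVisit dag (dag.length + 1) n vis deps = (vis, deps) := by
            rw [pvVisit.eq_2, if_neg hcv, hg]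
          rw [hV, ih st' vis deps (by simp at h; omega)]
        | some subs =>
          have hw : ((PySem.Dict.mk dag).getD n []).length = subs.length := by
            rw [PySem.Dict.getD_eq_get?_getD, hg]; rfl
          have hphi : pvPhi dag (PySem.Set.add vis n) + subs.length = pvPhi dag vis := by
            have h2 := pvWSum_add (dag := dag)
              (w := fun k => ((PySem.Dict.mk dag).getD k []).length)
              (pvGet?_mem_keys hg) hnv
            unfold pvPhi
            simpa [hw] using h2
          have hmes : (subs ++ st').length + pvPhi dag (PySem.Set.add vis n) ≤ f := by
            simp only [List.length_append, List.length_cons] at h ⊢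
            omega
          change pvLoop dag f (subs ++ st') (PySem.Set.add vis n)
            (PySem.Set.update deps subs) = _
          rw [ih (subs ++ st') (PySem.Set.add vis n) (PySem.Set.update deps subs) hmes,
            List.foldl_append]
          have hka : pvKappa dag (PySem.Set.add vis n) + 1 = pvKappa dag vis :=
            pvKappa_add (pvGet?_mem_keys hg) hnv
          have hkle : pvKappa dag vis ≤ dag.length := pvKappa_le dag vis
          have hV : pvVisit dag (dag.length + 1) n vis deps =
              subs.foldl (fun p sub => pvVisit dag (dag.length + 1) sub p.1 p.2)
                (PySem.Set.add vis n, PySem.Set.update deps subs) := by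
            rw [pvVisit.eq_2, if_neg hcv, hg]
            have hla : pvKappa dag (PySem.Set.add vis n) < dag.length := by omega
            have hlb : pvKappa dag (PySem.Set.add vis n) < dag.length + 1 := by omega
            exact pvFoldVisit_fuel dag dag.length (dag.length + 1) subs
              (PySem.Set.add vis n, PySem.Set.update deps subs) hla hlb
          rw [hV]

-- ===== VERDICT (by name: the statement is the Claim_ definition above) =====
theorem recursive_get_all_dependencies_for_step_in_dag_py_spec : Claim_equal_recursive_get_all_dependencies_for_step_in_dag_py := by
  intro dag step dependencies _ hpre
  have hmain := (pvMain dag (dag.length + 1) step PySem.Set.empty dependencies hpre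
    (by intro v hv; cases hv)).1
  have hfuel : ([step] : List String).length + pvPhi dag PySem.Set.empty ≤ pvFuelB dag := by
    unfold pvPhi pvWSum pvFuelB pvKeys
    have hfilter : (PySem.Set.ofList (dag.map Prod.fst)).filter
        (fun k => !PySem.Set.contains PySem.Set.empty k)
        = PySem.Set.ofList (dag.map Prod.fst) := by
      apply List.filter_eq_self.mpr
      intro a _
      simp [PySem.Set.contains, PySem.Set.empty]
    rw [hfilter]
    simp
  have hb := pvBridge dag (pvFuelB dag) [step] PySem.Set.empty dependencies hfuel
  unfold Spec_recursive_get_all_dependencies_for_step_in_dag_py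
  unfold recursive_get_all_dependencies_for_step_in_dag_py
  unfold recursive_get_all_dependencies_for_step_in_dag_py_alt
  rw [hb, List.foldl_cons, List.foldl_nil]
  exact hmain.symm

theorem recursive_get_all_dependencies_for_step_in_dag_py_raises : Claim_raises_recursive_get_all_dependencies_for_step_in_dag_py := by
  unfold Claim_raises_recursive_get_all_dependencies_for_step_in_dag_py
  constructor
  · intro dag step dependencies _ hr hp
    unfold Raises_recursive_get_all_dependencies_for_step_in_dag_py at hr
    unfold Pre_recursive_get_all_dependencies_for_step_in_dag_py at hp
    simp [hr] at hp
  · exact ⟨by decide, by decide, by decide⟩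

-- self-check: the stated raise witness does lie inside Raises_ (read off the crash-fix theorem)
theorem recursive_get_all_dependencies_for_step_in_dag_py_raises_ok :
    Raises_recursive_get_all_dependencies_for_step_in_dag_py
      (pvRaiseWitness_recursive_get_all_dependencies_for_step_in_dag_py.1)
      (pvRaiseWitness_recursive_get_all_dependencies_for_step_in_dag_py.2.1)
      (pvRaiseWitness_recursive_get_all_dependencies_for_step_in_dag_py.2.2) :=
  recursive_get_all_dependencies_for_step_in_dag_py_raises.2.2.1
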